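-- pv_equiv track=rewrite | github.com/jithyan/postgraduate-projects | Distributed and Parallel Algorithms for Big Data/task4.py | redistribute_data
-- ===== SOURCE A (Python) =====
-- def flatten_list(nested_list):
--     """
--         Un-nests a nested list.
--     """
--     flattened_list = []
--
--     for sublist in nested_list:
--         if sublist:
--             for item in sublist:
--                 flattened_list.append(item)
--
--     return flattened_list
--
-- def redistribute_data(processors):
--     """
--         Given a set of partitioned data from every every processor,
--         allocate the appropriate partition to their processor
--
--         Arguments:
--             processors - A nested diction. The first dictionary is of processors,
--                          who have partitioned their data into a dictionary, where
--                          the dictionary key is the processor the partition should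
--                          be allocated to.
--
--         Returns:
--             A dictionary of lists. The key is the processor id, and the value is
--             the list of records which belong to the processor. It is redistributed
--             data from the given argument.
--     """
--     new_distribution = {}
--
--     for processor_id in range(len(processors)):
--         for pid, partition in processors[processor_id].items():
--             if pid not in new_distribution:
--                 new_distribution[pid] = [partition]
--             else:
--                 new_distribution[pid].append(partition)
--
--     for pid, partition in new_distribution.items():
--         new_distribution[pid] = flatten_list(new_distribution[pid])
--
--     return new_distribution
-- ===== SOURCE B (Python) =====
-- def redistribute_data(processors):
--     new_distribution = {}
--     for partitions in processors:
--         for pid, partition in partitions.items():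
--             new_distribution.setdefault(pid, []).extend(partition)
--     return new_distribution
-- ===== Notes on version B (the rewrite author's own statement) =====
-- stated objective: simpler
-- what changed: B streams records straight into the flat per-pid lists via dict.setdefault(...).extend(...) in a single pass over the dicts themselves, eliminating A's list-of-lists intermediate, the flatten_list helper and the whole second flattening pass over the dict.
import Mathlib
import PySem

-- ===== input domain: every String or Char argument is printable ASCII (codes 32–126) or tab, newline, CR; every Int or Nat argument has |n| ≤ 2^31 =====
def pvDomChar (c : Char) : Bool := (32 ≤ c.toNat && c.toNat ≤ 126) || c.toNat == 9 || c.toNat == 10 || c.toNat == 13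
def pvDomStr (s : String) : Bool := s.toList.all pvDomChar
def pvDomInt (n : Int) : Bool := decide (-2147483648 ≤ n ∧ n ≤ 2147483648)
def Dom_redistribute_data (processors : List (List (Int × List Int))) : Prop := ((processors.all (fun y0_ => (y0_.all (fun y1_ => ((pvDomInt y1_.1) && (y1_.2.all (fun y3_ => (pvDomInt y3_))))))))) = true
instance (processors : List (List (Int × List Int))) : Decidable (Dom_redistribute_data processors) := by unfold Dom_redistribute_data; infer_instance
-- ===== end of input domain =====

-- B builds each processor's flat record list directly in one pass (setdefault+extend),
-- dropping A's list-of-lists intermediate and its second flattening pass; objective: simpler.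

-- ===== PORT A =====
def flatten_list (nested_list : List (List Int)) : List Int :=
  nested_list.foldl (fun acc sublist => if sublist ≠ [] then acc ++ sublist else acc) []

def redistribute_data (processors : List (List (Int × List Int))) : List (Int × List Int) :=
  let nd : PySem.Dict Int (List (List Int)) :=
    (PySem.List.pyRange 0 processors.length 1).foldl
      (fun nd processor_id =>
        (PySem.List.pyGetD processors processor_id []).foldl
          (fun nd p =>
            match nd.get? p.1 with
            | none => nd.insert p.1 [p.2]
            | some l => nd.insert p.1 (l ++ [p.2]))
          nd)
      PySem.Dict.empty
  -- Python's second loop reassigns nd[pid] in place with a value of a NEW type (List Int);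
  -- in Lean this is ported as rebuilding into a fresh dict in the same items order, which is
  -- exact for the returned dict (same keys, same order, same values).
  (nd.items.foldl (fun (out : PySem.Dict Int (List Int)) p => out.insert p.1 (flatten_list p.2)) PySem.Dict.empty).items

-- ===== PORT B =====
def redistribute_data_alt (processors : List (List (Int × List Int))) : List (Int × List Int) :=
  (processors.foldl
    (fun (nd : PySem.Dict Int (List Int)) partitions =>
      partitions.foldl (fun nd p => nd.modify p.1 [] (· ++ p.2)) nd)
    PySem.Dict.empty).items

-- ===== PRECONDITION & SPEC =====
def Spec_redistribute_data (processors : List (List (Int × List Int))) (out : List (Int × List Int)) : Prop := out = redistribute_data_alt processors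
instance (processors : List (List (Int × List Int))) (out : List (Int × List Int)) : Decidable (Spec_redistribute_data processors out) := by unfold Spec_redistribute_data; infer_instance

-- ===== CLAIM (what is proved, stated in full; the proofs are below) =====
def Claim_equal_redistribute_data : Prop := ∀ (processors : List (List (Int × List Int))), Dom_redistribute_data processors → Spec_redistribute_data processors (redistribute_data processors)

-- ===== LEMMAS AND PROOFS =====

theorem flatten_aux (l : List (List Int)) :
    ∀ acc, l.foldl (fun acc sublist => if sublist ≠ [] then acc ++ sublist else acc) acc
      = acc ++ l.flatten := by
  induction l with
  | nil => intro acc; simp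
  | cons s t ih =>
      intro acc
      rw [List.foldl_cons]
      by_cases h : s = []
      · rw [if_neg (by simp [h]), ih, h, List.flatten_cons, List.nil_append]
      · rw [if_pos h, ih, List.flatten_cons, List.append_assoc]

theorem flatten_list_eq_flatten (l : List (List Int)) : flatten_list l = l.flatten := by
  unfold flatten_list
  rw [flatten_aux, List.nil_append]

-- A's accumulation step / B's accumulation step, on one (pid, partition) pair
def stepA (nd : PySem.Dict Int (List (List Int))) (p : Int × List Int) : PySem.Dict Int (List (List Int)) :=
  match nd.get? p.1 with
  | none => nd.insert p.1 [p.2]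
  | some l => nd.insert p.1 (l ++ [p.2])

def stepB (nd : PySem.Dict Int (List Int)) (p : Int × List Int) : PySem.Dict Int (List Int) :=
  nd.modify p.1 [] (· ++ p.2)

-- one step preserves the invariant relating A's dict of partition lists to B's flat dict
theorem inv_step (p : Int × List Int) (dA : PySem.Dict Int (List (List Int))) (dB : PySem.Dict Int (List Int))
    (hnd : dA.keys.Nodup) (hk : dB.keys = dA.keys)
    (hv : ∀ k, dB.getD k [] = (dA.getD k []).flatten) :
    (stepA dA p).keys.Nodup ∧ (stepB dB p).keys = (stepA dA p).keys ∧
      ∀ k, (stepB dB p).getD k [] = ((stepA dA p).getD k []).flatten := by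
  have hcontains : dB.contains p.1 = dA.contains p.1 := by
    rw [PySem.Dict.contains_eq_decide_mem_keys, PySem.Dict.contains_eq_decide_mem_keys, hk]
  unfold stepA stepB
  cases hg : dA.get? p.1 with
  | none =>
      have hc : dA.contains p.1 = false := by
        rw [PySem.Dict.contains_eq_isSome_get?, hg]; rfl
      have hcB : dB.contains p.1 = false := by rw [hcontains]; exact hc
      have hpm : p.1 ∉ dA.keys := by
        rw [PySem.Dict.contains_eq_decide_mem_keys] at hc
        simpa using hc
      have hBgetD : dB.getD p.1 [] = [] := by
        rw [hv p.1, PySem.Dict.getD_of_not_contains dA [] hc]; rfl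
      refine ⟨?_, ?_, ?_⟩
      · show (dA.insert p.1 [p.2]).keys.Nodup
        rw [PySem.Dict.keys_insert_of_not_contains dA [p.2] hc]
        rw [List.nodup_append]
        exact ⟨hnd, List.nodup_singleton _, by
          intro a ha b hb heq
          rw [List.mem_singleton] at hb
          exact hpm (by rw [← hb, ← heq]; exact ha)⟩
      · show (dB.modify p.1 [] (· ++ p.2)).keys = (dA.insert p.1 [p.2]).keys
        rw [PySem.Dict.keys_modify, PySem.Dict.keys_insert_of_not_contains _ _ hcB,
            PySem.Dict.keys_insert_of_not_contains dA [p.2] hc, hk]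
      · intro k
        show (dB.modify p.1 [] (· ++ p.2)).getD k [] = ((dA.insert p.1 [p.2]).getD k []).flatten
        rw [PySem.Dict.getD_modify, PySem.Dict.getD_insert]
        by_cases hkk : k = p.1
        · rw [if_pos hkk, if_pos hkk, hBgetD]; simp
        · rw [if_neg hkk, if_neg hkk]; exact hv k
  | some l =>
      have hc : dA.contains p.1 = true := by
        rw [PySem.Dict.contains_eq_isSome_get?, hg]; rfl
      have hcB : dB.contains p.1 = true := by rw [hcontains]; exact hc
      have hAgetD : dA.getD p.1 [] = l := PySem.Dict.getD_of_get?_eq_some dA [] hg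
      refine ⟨?_, ?_, ?_⟩
      · show (dA.insert p.1 (l ++ [p.2])).keys.Nodup
        rw [PySem.Dict.keys_insert_of_contains dA _ hc]; exact hnd
      · show (dB.modify p.1 [] (· ++ p.2)).keys = (dA.insert p.1 (l ++ [p.2])).keys
        rw [PySem.Dict.keys_modify, PySem.Dict.keys_insert_of_contains _ _ hcB,
            PySem.Dict.keys_insert_of_contains dA _ hc, hk]
      · intro k
        show (dB.modify p.1 [] (· ++ p.2)).getD k [] = ((dA.insert p.1 (l ++ [p.2])).getD k []).flatten
        rw [PySem.Dict.getD_modify, PySem.Dict.getD_insert]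
        by_cases hkk : k = p.1
        · rw [if_pos hkk, if_pos hkk, hv p.1, hAgetD]; simp
        · rw [if_neg hkk, if_neg hkk]; exact hv k

theorem inv_fold (ps : List (Int × List Int)) :
    ∀ (dA : PySem.Dict Int (List (List Int))) (dB : PySem.Dict Int (List Int)),
    dA.keys.Nodup → dB.keys = dA.keys → (∀ k, dB.getD k [] = (dA.getD k []).flatten) →
    (ps.foldl stepA dA).keys.Nodup ∧ (ps.foldl stepB dB).keys = (ps.foldl stepA dA).keys ∧
      ∀ k, (ps.foldl stepB dB).getD k [] = ((ps.foldl stepA dA).getD k []).flatten := by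
  induction ps with
  | nil => intro dA dB h1 h2 h3; exact ⟨h1, h2, h3⟩
  | cons p t ih =>
      intro dA dB h1 h2 h3
      obtain ⟨g1, g2, g3⟩ := inv_step p dA dB h1 h2 h3
      simpa [List.foldl] using ih (stepA dA p) (stepB dB p) g1 g2 g3

-- ===== VERDICT (by name: the statement is the Claim_ definition above) =====
theorem redistribute_data_spec : Claim_equal_redistribute_data := by
  intro processors _
  unfold Spec_redistribute_data redistribute_data redistribute_data_alt
  rw [show (fun (nd : PySem.Dict Int (List (List Int))) (processor_id : Int) =>
        (PySem.List.pyGetD processors processor_id []).foldl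
          (fun nd p =>
            match nd.get? p.1 with
            | none => nd.insert p.1 [p.2]
            | some l => nd.insert p.1 (l ++ [p.2])) nd)
      = (fun nd j => (PySem.List.pyGetD processors j []).foldl stepA nd) from rfl]
  rw [PySem.List.foldl_pyRange_pyGetD' processors [] (fun nd d => d.foldl stepA nd)
        PySem.Dict.empty (a := 0) (by norm_num)]
  simp only [Int.toNat_zero, List.drop_zero]
  rw [show (fun (nd : PySem.Dict Int (List Int)) (partitions : List (Int × List Int)) =>
        partitions.foldl (fun nd p => nd.modify p.1 [] (· ++ p.2)) nd)
      = (fun nd d => d.foldl stepB nd) from rfl]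
  rw [← List.foldl_flatten (f := stepA), ← List.foldl_flatten (f := stepB)]
  obtain ⟨hnd, hk, hv⟩ := inv_fold processors.flatten PySem.Dict.empty PySem.Dict.empty
    PySem.Dict.nodup_keys_empty rfl (fun k => by rw [PySem.Dict.getD_empty, PySem.Dict.getD_empty]; rfl)
  set dA := processors.flatten.foldl stepA PySem.Dict.empty with hdA
  set dB := processors.flatten.foldl stepB PySem.Dict.empty with hdB
  have hndB : dB.keys.Nodup := hk ▸ hnd
  rw [PySem.Dict.items_foldl_insert_fresh dA.items Prod.fst (fun p => flatten_list p.2)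
      PySem.Dict.empty (fun a _ => PySem.Dict.contains_empty _)
      (by simpa [PySem.Dict.keys] using hnd)]
  rw [PySem.Dict.items_eq_map_keys dA hnd [], PySem.Dict.items_eq_map_keys dB hndB []]
  simp only [List.map_map, hk]
  have hempty : (PySem.Dict.empty : PySem.Dict Int (List Int)).items = ([] : List (Int × List Int)) := rfl
  rw [hempty, List.nil_append]
  apply List.map_congr_left
  intro k _
  simp only [Function.comp_apply]
  rw [flatten_list_eq_flatten, hv k]
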